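-- pv_equiv track=rewrite | github.com/nvietsang/artifact | ch3/3-4_so-attack/4_successcount.py | trim_tuple
-- ===== SOURCE A (Python) =====
-- def extract_bit(x, j):
--     '''
--     :param x: an integer of 64 bits
--     :param j: index
--     '''
--     return (x >> j) & 1
--
-- def trim_tuple(x: int, i0, nd, selection_function):
--     '''
--     :param x: an integer of 64 bits
--     '''
--     if   selection_function == "z0":
--         i1 = (i0 + 19) % 64
--         i2 = (i0 + 28) % 64
--     elif selection_function == "z1":
--         i1 = (i0 + 61) % 64
--         i2 = (i0 + 39) % 64
--     elif selection_function == "z4":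
--         i1 = (i0 +  7) % 64
--         i2 = (i0 + 41) % 64
--     else: raise ValueError
--
--     v2 = 0
--     for i in range(nd-1,-1,-1):
--         j2 = (i+i2)%64
--         b2 = extract_bit(x, j2)
--         v2 ^= (b2 << i)
--
--     v1 = 0
--     for i in range(nd-1,-1,-1):
--         j1 = (i+i1)%64
--         b1 = extract_bit(x, j1)
--         v1 ^= (b1 << i)
--
--     v0 = 0
--     for i in range(nd-1,-1,-1):
--         j0 = (i+i0)%64
--         b0 = extract_bit(x, j0)
--         v0 ^= (b0 << i)
--
--     tup = (v2 << (2*nd)) | (v1 << (nd)) | (v0)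
--     return tup
-- ===== SOURCE B (Python) =====
-- def trim_tuple(x: int, i0, nd, selection_function):
--     '''
--     :param x: an integer of 64 bits
--     '''
--     if   selection_function == "z0": d1, d2 = 19, 28
--     elif selection_function == "z1": d1, d2 = 61, 39
--     elif selection_function == "z4": d1, d2 = 7, 41
--     else: raise ValueError
--
--     xm = x % (1 << 64)
--     mask = (1 << nd) - 1
--     reps = (nd + 63) // 64
--
--     def pick(off):
--         off %= 64
--         rot = ((xm >> off) | (xm << (64 - off))) % (1 << 64)
--         val = 0
--         for k in range(reps):
--             val |= rot << (64 * k)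
--         return val & mask
--
--     return (pick(i0 + d2) << (2 * nd)) | (pick(i0 + d1) << nd) | pick(i0)
-- ===== Notes on version B (the rewrite author's own statement) =====
-- stated objective: faster
-- what changed: replaces the three per-bit extraction loops (nd iterations each) by one 64-bit circular rotation per slice, replicated across ceil(nd/64) 64-bit blocks and masked
import Mathlib
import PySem

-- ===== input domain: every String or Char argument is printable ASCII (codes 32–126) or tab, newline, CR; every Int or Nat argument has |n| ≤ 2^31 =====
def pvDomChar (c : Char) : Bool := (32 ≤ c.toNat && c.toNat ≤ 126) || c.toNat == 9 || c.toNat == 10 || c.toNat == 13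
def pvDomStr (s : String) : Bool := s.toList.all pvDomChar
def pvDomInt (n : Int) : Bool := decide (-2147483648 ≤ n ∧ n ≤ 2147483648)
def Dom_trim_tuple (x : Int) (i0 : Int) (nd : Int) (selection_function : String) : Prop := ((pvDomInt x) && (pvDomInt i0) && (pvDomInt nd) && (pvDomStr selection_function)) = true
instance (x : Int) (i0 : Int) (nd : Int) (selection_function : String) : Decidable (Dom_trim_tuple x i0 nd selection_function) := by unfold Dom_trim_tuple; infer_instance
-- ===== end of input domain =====

-- B replaces A's three per-bit extraction loops (nd iterations each) by one 64-bit circular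
-- rotation per slice, replicated across ceil(nd/64) 64-bit blocks and masked (objective: faster,
-- fewer big-int operations; the measured result is whatever a timing run reports).


-- ===== PORT A =====
-- extract_bit(x, j) = (x >> j) & 1; j is nonnegative at every call site ((i + …) % 64), so .toNat is exact
def extract_bit (x : Int) (j : Int) : Int := PySem.Int.band (x >>> j.toNat) 1

-- one of A's three identical 'for i in range(nd-1,-1,-1): v ^= extract_bit(x,(i+off)%64) << i' loops
def pvA_slice (x : Int) (off : Int) (nd : Int) : Int :=
  (PySem.List.pyRange (nd - 1) (-1) (-1)).foldl
    (fun v i => PySem.Int.bxor v (extract_bit x (PySem.Int.mod (i + off) 64) <<< i.toNat)) 0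

-- the shared tail: v2,v1,v0 loops then (v2 << 2*nd) | (v1 << nd) | v0; shift counts are
-- nonnegative under Pre_ (Python raises ValueError for nd < 0), so .toNat is exact there
def pvA_core (x : Int) (i0 : Int) (i1 : Int) (i2 : Int) (nd : Int) : Int :=
  let v2 := pvA_slice x i2 nd
  let v1 := pvA_slice x i1 nd
  let v0 := pvA_slice x i0 nd
  PySem.Int.bor (PySem.Int.bor (v2 <<< (2 * nd).toNat) (v1 <<< nd.toNat)) v0

def trim_tuple (x : Int) (i0 : Int) (nd : Int) (selection_function : String) : Int :=
  if selection_function == "z0" then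
    pvA_core x i0 (PySem.Int.mod (i0 + 19) 64) (PySem.Int.mod (i0 + 28) 64) nd
  else if selection_function == "z1" then
    pvA_core x i0 (PySem.Int.mod (i0 + 61) 64) (PySem.Int.mod (i0 + 39) 64) nd
  else if selection_function == "z4" then
    pvA_core x i0 (PySem.Int.mod (i0 + 7) 64) (PySem.Int.mod (i0 + 41) 64) nd
  else 0  -- Python raises ValueError here; excluded by Pre_

-- ===== PORT B =====
-- pick(off): off %= 64; rot = ((xm >> off) | (xm << (64-off))) % 2**64;
-- val = OR of rot << 64*k for k in range(reps); return val & mask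
def pvB_pick (xm : Int) (reps : Int) (mask : Int) (off : Int) : Int :=
  let o := PySem.Int.mod off 64
  let rot := PySem.Int.mod (PySem.Int.bor (xm >>> o.toNat) (xm <<< ((64 : Int) - o).toNat)) 18446744073709551616
  let val := (PySem.List.pyRange 0 reps 1).foldl
    (fun val k => PySem.Int.bor val (rot <<< (64 * k).toNat)) 0
  PySem.Int.band val mask

def pvB_core (x : Int) (i0 : Int) (d1 : Int) (d2 : Int) (nd : Int) : Int :=
  let xm := PySem.Int.mod x 18446744073709551616
  let mask := (1 : Int) <<< nd.toNat - 1
  let reps := PySem.Int.floordiv (nd + 63) 64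
  PySem.Int.bor
    (PySem.Int.bor (pvB_pick xm reps mask (i0 + d2) <<< (2 * nd).toNat)
      (pvB_pick xm reps mask (i0 + d1) <<< nd.toNat))
    (pvB_pick xm reps mask i0)

def trim_tuple_alt (x : Int) (i0 : Int) (nd : Int) (selection_function : String) : Int :=
  if selection_function == "z0" then pvB_core x i0 19 28 nd
  else if selection_function == "z1" then pvB_core x i0 61 39 nd
  else if selection_function == "z4" then pvB_core x i0 7 41 nd
  else 0  -- Python raises ValueError here; excluded by Pre_

-- ===== PRECONDITION & SPEC =====
-- exactly where the Python A returns: a known selection function (else ValueError) and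
-- nd ≥ 0 (a negative nd reaches 'v2 << (2*nd)', a negative shift count, ValueError)
def Pre_trim_tuple (x : Int) (i0 : Int) (nd : Int) (selection_function : String) : Prop :=
  (selection_function = "z0" ∨ selection_function = "z1" ∨ selection_function = "z4") ∧ 0 ≤ nd
instance (x : Int) (i0 : Int) (nd : Int) (selection_function : String) : Decidable (Pre_trim_tuple x i0 nd selection_function) := by unfold Pre_trim_tuple; infer_instance

def pvWitness_trim_tuple : Int × Int × Int × String := (5, 3, 7, "z0")

def Spec_trim_tuple (x : Int) (i0 : Int) (nd : Int) (selection_function : String) (out : Int) : Prop := out = trim_tuple_alt x i0 nd selection_function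
instance (x : Int) (i0 : Int) (nd : Int) (selection_function : String) (out : Int) : Decidable (Spec_trim_tuple x i0 nd selection_function out) := by unfold Spec_trim_tuple; infer_instance

-- ===== CLAIM (what is proved, stated in full; the proofs are below) =====
def Claim_equal_trim_tuple : Prop := ∀ (x : Int) (i0 : Int) (nd : Int) (selection_function : String), Dom_trim_tuple x i0 nd selection_function → Pre_trim_tuple x i0 nd selection_function → Spec_trim_tuple x i0 nd selection_function (trim_tuple x i0 nd selection_function)

-- ===== LEMMAS AND PROOFS =====

-- Nat-level model of both computations
def pvBit (X : Nat) (o : Nat) (i : Nat) : Nat := cond (X.testBit ((i + o) % 64)) 1 0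

def pvFA (X : Nat) (o : Nat) : Nat → Nat
  | 0 => 0
  | n + 1 => (pvBit X o n <<< n) ^^^ pvFA X o n

def pvRotN (X : Nat) (o : Nat) : Nat := ((X >>> o) ||| (X <<< (64 - o))) % 2 ^ 64

def pvFB (rot : Nat) : Nat → Nat
  | 0 => 0
  | r + 1 => pvFB rot r ||| rot <<< (64 * r)

lemma pvIntShiftLeft (a : Nat) (n : Nat) : (a : Int) <<< n = ((a <<< n : Nat) : Int) := by
  rw [← Int.shiftLeft_natCast_right, Int.shiftLeft_natCast]

lemma pvIntShiftRight (a : Nat) (n : Nat) : (a : Int) >>> n = ((a >>> n : Nat) : Int) := by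
  rw [← Int.shiftRight_natCast_right, Int.shiftRight_natCast]

lemma pvTestBit_div (n i : Nat) : n.testBit i = decide (n / 2 ^ i % 2 = 1) := by
  rw [Nat.testBit, Nat.shiftRight_eq_div_pow]
  rcases Nat.mod_two_eq_zero_or_one (n / 2 ^ i) with h | h <;>
    simp [h]

lemma pvExtract (x : Int) (j : Nat) (hj : j < 64) :
    extract_bit x (j : Int) =
      ((cond ((x % 18446744073709551616).toNat.testBit j) 1 0 : Nat) : Int) := by
  have hM : (18446744073709551616 : Int) = 2 ^ (64 - j) * 2 ^ j := by
    rw [← pow_add, show 64 - j + j = 64 by omega]; norm_num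
  have h0 : (0 : Int) ≤ x % 18446744073709551616 := Int.emod_nonneg x (by norm_num)
  have hsplit : x = x % 18446744073709551616 + 2 ^ (64 - j) * (x / 18446744073709551616) * 2 ^ j := by
    conv_lhs => rw [← Int.emod_add_ediv x 18446744073709551616]
    rw [hM]; ring
  have key : x / 2 ^ j % 2 = (((x % 18446744073709551616).toNat / 2 ^ j % 2 : Nat) : Int) := by
    calc x / 2 ^ j % 2
        = (x % 18446744073709551616 + 2 ^ (64 - j) * (x / 18446744073709551616) * 2 ^ j) / 2 ^ j % 2 := by
          rw [← hsplit]
      _ = (x % 18446744073709551616 / 2 ^ j + 2 ^ (64 - j) * (x / 18446744073709551616)) % 2 := by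
          rw [Int.add_mul_ediv_right _ _ (show (2:Int) ^ j ≠ 0 by positivity)]
      _ = x % 18446744073709551616 / 2 ^ j % 2 := by
          have h2 : (2 : Int) ^ (64 - j) = 2 * 2 ^ (63 - j) := by
            rw [← pow_succ']; congr 1; omega
          rw [h2, mul_assoc]
          omega
      _ = (((x % 18446744073709551616).toNat / 2 ^ j % 2 : Nat) : Int) := by
          conv_lhs => rw [← Int.toNat_of_nonneg h0]
          push_cast [Int.natCast_div]
          ring
  unfold extract_bit
  rw [PySem.Int.band_one, PySem.Int.mod_eq_emod_of_pos (show (0:Int) < 2 by norm_num)]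
  rw [Int.toNat_natCast, Int.shiftRight_eq_div_pow, Nat.cast_pow, Nat.cast_ofNat, key,
    pvTestBit_div]
  rcases Nat.mod_two_eq_zero_or_one ((x % 18446744073709551616).toNat / 2 ^ j) with h | h <;> simp [h]

lemma pvIdx (i o : Nat) :
    PySem.Int.mod ((i : Int) + (o : Int)) 64 = (((i + o) % 64 : Nat) : Int) := by
  have h := PySem.Int.mod_natCast (i + o) 64
  push_cast at h ⊢
  exact h

lemma pvA_fold (x : Int) (o : Nat) (ho : o < 64) :
    ∀ (N : Nat) (A : Nat),
      (PySem.List.pyRange ((N : Int) - 1) (-1) (-1)).foldl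
        (fun v i => PySem.Int.bxor v (extract_bit x (PySem.Int.mod (i + (o : Int)) 64) <<< i.toNat))
        ((A : Nat) : Int) =
      ((A ^^^ pvFA (x % 18446744073709551616).toNat o N : Nat) : Int)
  | 0, A => by
    rw [show ((0 : Nat) : Int) - 1 = -1 by norm_num,
      PySem.List.pyRange_neg_one_eq_nil (le_refl (-1 : Int))]
    simp [pvFA]
  | N + 1, A => by
    have h1 : (((N + 1 : Nat)) : Int) - 1 = (N : Int) := by push_cast; ring
    rw [h1, PySem.List.pyRange_neg_one_cons (show (-1 : Int) < (N : Int) by omega), List.foldl_cons]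
    have hstep : PySem.Int.bxor ((A : Nat) : Int)
        (extract_bit x (PySem.Int.mod ((N : Int) + (o : Int)) 64) <<< ((N : Int)).toNat) =
        ((A ^^^ (pvBit (x % 18446744073709551616).toNat o N <<< N) : Nat) : Int) := by
      rw [pvIdx, pvExtract x ((N + o) % 64) (Nat.mod_lt _ (by norm_num)), Int.toNat_natCast,
        show (cond ((x % 18446744073709551616).toNat.testBit ((N + o) % 64)) 1 0 : Nat) =
          pvBit (x % 18446744073709551616).toNat o N from rfl, pvIntShiftLeft]
      exact PySem.Int.bxor_natCast _ _
    show (PySem.List.pyRange ((N : Int) - 1) (-1) (-1)).foldl _ (PySem.Int.bxor _ _) = _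
    rw [hstep, pvA_fold x o ho N (A ^^^ (pvBit (x % 18446744073709551616).toNat o N <<< N))]
    congr 1
    rw [pvFA, Nat.xor_assoc]

lemma pvA_slice_eq (x : Int) (o : Nat) (ho : o < 64) (N : Nat) :
    pvA_slice x (o : Int) (N : Int) =
      ((pvFA (x % 18446744073709551616).toNat o N : Nat) : Int) := by
  have h := pvA_fold x o ho N 0
  simpa [pvA_slice] using h

lemma pvA_slice_mod (x : Int) (off : Int) (nd : Int) :
    pvA_slice x off nd = pvA_slice x (PySem.Int.mod off 64) nd := by
  unfold pvA_slice
  have h : ∀ i : Int, PySem.Int.mod (i + off) 64 = PySem.Int.mod (i + PySem.Int.mod off 64) 64 := by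
    intro i
    simp only [PySem.Int.mod_eq_emod_of_pos (show (0:Int) < 64 by norm_num)]
    omega
  congr 1
  funext v i
  rw [h i]

lemma pvFoldB (rot : Nat) : ∀ (r : Nat),
    (PySem.List.pyRange 0 (r : Int) 1).foldl
      (fun val k => PySem.Int.bor val ((rot : Int) <<< (64 * k).toNat)) 0 =
      ((pvFB rot r : Nat) : Int)
  | 0 => by
    rw [show ((0 : Nat) : Int) = 0 from rfl, PySem.List.pyRange_one_eq_nil (le_refl (0 : Int))]
    simp [pvFB]
  | r + 1 => by
    have h1 : (((r + 1 : Nat)) : Int) = (r : Int) + 1 := by push_cast; ring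
    rw [h1, PySem.List.pyRange_one_succ_right (by positivity : (0 : Int) ≤ (r : Int)),
      List.foldl_append, pvFoldB rot r, List.foldl_cons, List.foldl_nil]
    rw [show ((64 : Int) * (r : Int)).toNat = 64 * r by omega, Int.shiftLeft_natCast,
      PySem.Int.bor_natCast, pvFB]

lemma pvB_pick_eq (x : Int) (off : Int) (N : Nat) :
    pvB_pick (PySem.Int.mod x 18446744073709551616) (PySem.Int.floordiv ((N : Int) + 63) 64)
        ((1 : Int) <<< ((N : Int)).toNat - 1) off =
      ((pvFB (pvRotN (x % 18446744073709551616).toNat ((off % 64).toNat)) ((N + 63) / 64) &&&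
          (2 ^ N - 1) : Nat) : Int) := by
  have hO : PySem.Int.mod off 64 = (((off % 64).toNat : Nat) : Int) := by
    rw [PySem.Int.mod_eq_emod_of_pos (show (0:Int) < 64 by norm_num),
      Int.toNat_of_nonneg (Int.emod_nonneg off (by norm_num))]
  have hxm : PySem.Int.mod x 18446744073709551616 = (((x % 18446744073709551616).toNat : Nat) : Int) := by
    rw [PySem.Int.mod_eq_emod_of_pos (by norm_num),
      Int.toNat_of_nonneg (Int.emod_nonneg x (by norm_num))]
  have hreps : PySem.Int.floordiv ((N : Int) + 63) 64 = (((N + 63) / 64 : Nat) : Int) := by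
    have h := PySem.Int.floordiv_natCast (N + 63) 64
    push_cast at h ⊢
    exact h
  set o := (off % 64).toNat with ho_def
  set X := (x % 18446744073709551616).toNat with hX_def
  simp only [pvB_pick, hO, hxm, hreps, Int.toNat_natCast]
  rw [show ((64 : Int) - (o : Int)).toNat = 64 - o from by omega]
  rw [pvIntShiftRight X o, pvIntShiftLeft X (64 - o), PySem.Int.bor_natCast]
  rw [show (18446744073709551616 : Int) = ((2 ^ 64 : Nat) : Int) from by norm_num,
    PySem.Int.mod_natCast]
  rw [show ((X >>> o ||| X <<< (64 - o)) % 2 ^ 64 : Nat) = pvRotN X o from rfl]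
  rw [pvFoldB (pvRotN X o) ((N + 63) / 64)]
  rw [show (1 : Int) = ((1 : Nat) : Int) from rfl, pvIntShiftLeft 1 N,
    show (1 <<< N : Nat) = 2 ^ N from by rw [Nat.shiftLeft_eq, one_mul],
    ← Nat.cast_sub Nat.one_le_two_pow]
  rw [PySem.Int.band_natCast]

lemma pvRot_testBit (X o : Nat) (hX : X < 2 ^ 64) (ho : o < 64) (t : Nat) :
    (pvRotN X o).testBit t = (decide (t < 64) && X.testBit ((t + o) % 64)) := by
  unfold pvRotN
  rw [Nat.testBit_mod_two_pow, Nat.testBit_or, Nat.testBit_shiftRight, Nat.testBit_shiftLeft]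
  by_cases ht : t < 64
  · by_cases hto : t + o < 64
    · have h2 : ¬ (64 - o ≤ t) := by omega
      simp [ht, Nat.mod_eq_of_lt hto, h2, Nat.add_comm o t]
    · have hb : X.testBit (o + t) = false :=
        Nat.testBit_lt_two_pow (lt_of_lt_of_le hX (Nat.pow_le_pow_right (by omega) (by omega)))
      have h2 : 64 - o ≤ t := by omega
      have he : t - (64 - o) = (t + o) % 64 := by omega
      simp [ht, hb, h2, he]
  · simp [ht]

lemma pvFB_testBit (rot : Nat) (hrot : rot < 2 ^ 64) :
    ∀ (r t : Nat), (pvFB rot r).testBit t = (decide (t < 64 * r) && rot.testBit (t % 64))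
  | 0, t => by simp [pvFB]
  | r + 1, t => by
    rw [pvFB, Nat.testBit_or, Nat.testBit_shiftLeft, pvFB_testBit rot hrot r t]
    by_cases h1 : t < 64 * r
    · simp [h1, show t < 64 * (r + 1) by omega, show ¬ (64 * r ≤ t) by omega]
    · by_cases h2 : t < 64 * (r + 1)
      · simp [h1, h2, show 64 * r ≤ t by omega, show t - 64 * r = t % 64 by omega]
      · have hb : rot.testBit (t - 64 * r) = false :=
          Nat.testBit_lt_two_pow (lt_of_lt_of_le hrot (Nat.pow_le_pow_right (by omega) (by omega)))
        simp [h1, h2, hb]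

lemma pvFA_testBit (X o : Nat) :
    ∀ (N t : Nat), (pvFA X o N).testBit t = (decide (t < N) && X.testBit ((t + o) % 64))
  | 0, t => by simp [pvFA]
  | N + 1, t => by
    rw [pvFA, Nat.testBit_xor, Nat.testBit_shiftLeft, pvFA_testBit X o N t]
    rcases Nat.lt_trichotomy t N with h | rfl | h
    · simp [show ¬ (N ≤ t) by omega, h, show t < N + 1 by omega]
    · unfold pvBit
      cases hb : X.testBit ((t + o) % 64) <;> simp [hb]
    · have hle : pvBit X o N ≤ 1 := by
        unfold pvBit; cases X.testBit ((N + o) % 64) <;> simp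
      have hb : (pvBit X o N).testBit (t - N) = false :=
        Nat.testBit_lt_two_pow
          (lt_of_le_of_lt hle (Nat.one_lt_two_pow (by omega)))
      simp [hb, show ¬ (t < N) by omega, show ¬ (t < N + 1) by omega]

lemma pvNat_eq (X o N : Nat) (hX : X < 2 ^ 64) (ho : o < 64) :
    pvFA X o N = pvFB (pvRotN X o) ((N + 63) / 64) &&& (2 ^ N - 1) := by
  have hrot : pvRotN X o < 2 ^ 64 := Nat.mod_lt _ (by norm_num)
  apply Nat.eq_of_testBit_eq
  intro t
  rw [pvFA_testBit, Nat.testBit_and, pvFB_testBit _ hrot, pvRot_testBit X o hX ho,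
    Nat.testBit_two_pow_sub_one]
  have hidx : (t % 64 + o) % 64 = (t + o) % 64 := by omega
  by_cases htN : t < N
  · simp [htN, show t < 64 * ((N + 63) / 64) by omega, hidx, show t % 64 < 64 by omega]
  · simp [htN]

lemma pvSlice_eq (x : Int) (off : Int) (nd : Int) (hnd : 0 ≤ nd) :
    pvA_slice x (PySem.Int.mod off 64) nd =
      pvB_pick (PySem.Int.mod x 18446744073709551616) (PySem.Int.floordiv (nd + 63) 64)
        ((1 : Int) <<< nd.toNat - 1) off := by
  obtain ⟨N, rfl⟩ : ∃ N : Nat, nd = (N : Int) := ⟨nd.toNat, (Int.toNat_of_nonneg hnd).symm⟩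
  have hO : PySem.Int.mod off 64 = (((off % 64).toNat : Nat) : Int) := by
    rw [PySem.Int.mod_eq_emod_of_pos (show (0:Int) < 64 by norm_num),
      Int.toNat_of_nonneg (Int.emod_nonneg off (by norm_num))]
  have hoLT : (off % 64).toNat < 64 := by
    have := Int.emod_lt_of_pos off (show (0:Int) < 64 by norm_num)
    omega
  have hX : (x % 18446744073709551616).toNat < 2 ^ 64 := by
    rw [show (2 : Nat) ^ 64 = 18446744073709551616 by norm_num]
    have h1 := Int.emod_lt_of_pos x (show (0:Int) < 18446744073709551616 by norm_num)
    omega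
  rw [hO, pvA_slice_eq x ((off % 64).toNat) hoLT N, pvB_pick_eq x off N,
    pvNat_eq _ _ N hX hoLT]

lemma pvCore_eq (x : Int) (i0 : Int) (d1 : Int) (d2 : Int) (nd : Int) (hnd : 0 ≤ nd) :
    pvA_core x i0 (PySem.Int.mod (i0 + d1) 64) (PySem.Int.mod (i0 + d2) 64) nd =
      pvB_core x i0 d1 d2 nd := by
  simp only [pvA_core, pvB_core]
  rw [pvSlice_eq x (i0 + d2) nd hnd, pvSlice_eq x (i0 + d1) nd hnd,
    pvA_slice_mod x i0 nd, pvSlice_eq x i0 nd hnd]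

-- ===== VERDICT (by name: the statement is the Claim_ definition above) =====
theorem trim_tuple_spec : Claim_equal_trim_tuple := by
  intro x i0 nd sf _hdom hpre
  obtain ⟨hsf, hnd⟩ := hpre
  unfold Spec_trim_tuple
  rcases hsf with rfl | rfl | rfl <;>
    simp only [trim_tuple, trim_tuple_alt, beq_self_eq_true, if_true, String.reduceBEq,
      Bool.false_eq_true, if_false] <;>
    exact pvCore_eq x i0 _ _ nd hnd
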